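-- pv_equiv track=rewrite | github.com/clarkjac14/yellowpagesscraper | deduplicator.py | groupNames
-- ===== SOURCE A (Python) =====
-- from collections import defaultdict
--
-- def groupNames(rows):
-- 	"""
-- 	Groups rows together by same name.
-- 	"""
-- 	names = []
-- 	groups = defaultdict(list)
-- 	for row in rows:
-- 		name = row[0]
-- 		if name not in names:
-- 			names.append(name)
-- 		groups[name].append(row)
-- 	return (names, groups)
-- ===== SOURCE B (Python) =====
-- from collections import defaultdict
--
-- def groupNames(rows):
-- 	"""
-- 	Groups rows together by same name.
-- 	"""
-- 	names = []
-- 	groups = defaultdict(list)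
-- 	rest = rows
-- 	while rest:
-- 		name = rest[0][0]
-- 		names.append(name)
-- 		groups[name] = [r for r in rest if r[0] == name]
-- 		rest = [r for r in rest if r[0] != name]
-- 	return (names, groups)
-- ===== Notes on version B (the rewrite author's own statement) =====
-- stated objective: alternative
-- what changed: Replaces A's single row-by-row fold (maintained names list + per-row defaultdict append) with a repeated-partition algorithm: while rows remain, take the head row's name, extract the whole group for that name by one filter pass, assign it as the finished group, and recurse on the rows whose name differs.
import Mathlib
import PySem

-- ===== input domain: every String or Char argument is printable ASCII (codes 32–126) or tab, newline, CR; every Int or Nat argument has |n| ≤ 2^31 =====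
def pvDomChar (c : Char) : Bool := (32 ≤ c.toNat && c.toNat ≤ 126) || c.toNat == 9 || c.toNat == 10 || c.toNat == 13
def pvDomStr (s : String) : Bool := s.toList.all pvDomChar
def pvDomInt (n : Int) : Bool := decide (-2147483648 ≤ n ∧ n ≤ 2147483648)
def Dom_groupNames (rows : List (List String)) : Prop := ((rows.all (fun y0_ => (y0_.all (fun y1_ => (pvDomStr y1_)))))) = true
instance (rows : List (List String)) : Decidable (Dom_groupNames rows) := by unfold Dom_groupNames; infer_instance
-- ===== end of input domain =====

-- B replaces A's row-by-row fold with a repeated-partition algorithm: take the head row's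
-- name, extract that whole group in one filter pass, recurse on the rows whose name differs
-- (objective: alternative; same result, genuinely different traversal).

-- ===== PORT A =====
-- for row in rows: name = row[0]; if name not in names: names.append(name); groups[name].append(row)
def groupNames (rows : List (List String)) : List String × (List (String × List (List String))) :=
  let st := rows.foldl
    (fun (st : List String × PySem.Dict String (List (List String))) row =>
      let name := row.headD ""   -- row[0]; Pre_ guarantees row ≠ []
      let names := if name ∈ st.1 then st.1 else st.1 ++ [name]
      (names, st.2.modify name [] (· ++ [row])))
    ([], PySem.Dict.empty)
  (st.1, st.2.items)

-- ===== PORT B =====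
-- while rest: name = rest[0][0]; names.append(name); groups[name] = [r for r in rest if r[0]==name];
--             rest = [r for r in rest if r[0]!=name]
-- Each pass assigns one FRESH key, so the defaultdict's items are exactly the groups in
-- the order produced; the names list is the first components of those groups.
def groupGo : List (List String) → List (String × List (List String))
  | [] => []
  | row :: rest =>
    (row.headD "", (row :: rest).filter (fun r => r.headD "" == row.headD "")) ::
      groupGo (rest.filter (fun r => !(r.headD "" == row.headD "")))
termination_by l => l.length
decreasing_by
  simp only [List.length_cons, List.length_unattach]
  exact Nat.lt_succ_of_le (le_trans (List.length_filter_le _ _) (by simp))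

def groupNames_alt (rows : List (List String)) : List String × (List (String × List (List String))) :=
  ((groupGo rows).map Prod.fst, groupGo rows)

-- ===== PRECONDITION & SPEC =====
-- Pre_ excludes rows containing an empty row: there A (row[0]) raises IndexError (so does B).
def Pre_groupNames (rows : List (List String)) : Prop := ∀ r ∈ rows, r ≠ []
instance (rows : List (List String)) : Decidable (Pre_groupNames rows) := by unfold Pre_groupNames; infer_instance
def pvWitness_groupNames : List (List String) := [["a","1"],["b"],["a","2"]]
def Spec_groupNames (rows : List (List String)) (out : List String × (List (String × List (List String)))) : Prop := out = groupNames_alt rows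
instance (rows : List (List String)) (out : List String × (List (String × List (List String)))) : Decidable (Spec_groupNames rows out) := by unfold Spec_groupNames; infer_instance

-- ===== CLAIM =====
def Claim_equal_groupNames : Prop := ∀ (rows : List (List String)), Dom_groupNames rows → Pre_groupNames rows → Spec_groupNames rows (groupNames rows)

-- ===== LEMMAS AND PROOFS =====

-- First-seen ordered dedup relative to an accumulator of already-seen keys.
def myK (acc : List String) : List String → List String
  | [] => []
  | x :: xs => if x ∈ acc then myK acc xs else x :: myK (acc ++ [x]) xs

theorem mem_myK {y : String} : ∀ {acc xs : List String}, y ∈ myK acc xs → y ∈ xs := by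
  intro acc xs
  induction xs generalizing acc with
  | nil => simp [myK]
  | cons x xs ih =>
    simp only [myK]
    split_ifs with h
    · intro hy; exact List.mem_cons_of_mem _ (ih hy)
    · intro hy
      rcases List.mem_cons.mp hy with h1 | h1
      · simp [h1]
      · exact List.mem_cons_of_mem _ (ih h1)

theorem myK_congr : ∀ (xs acc acc' : List String), (∀ y, y ∈ acc ↔ y ∈ acc') → myK acc xs = myK acc' xs := by
  intro xs
  induction xs with
  | nil => intro _ _ _; simp [myK]
  | cons x xs ih =>
    intro acc acc' h
    simp only [myK, h x]
    split_ifs with hx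
    · exact ih acc acc' h
    · rw [ih (acc ++ [x]) (acc' ++ [x]) (by intro y; simp [h y])]

theorem myK_filter : ∀ (xs acc : List String) (a : String),
    myK (acc ++ [a]) xs = myK acc (xs.filter (fun y => !(y == a))) := by
  intro xs
  induction xs with
  | nil => intro _ _; simp [myK]
  | cons x xs ih =>
    intro acc a
    by_cases hxa : x = a
    · subst hxa
      rw [List.filter_cons_of_neg (by simp)]
      rw [show myK (acc ++ [x]) (x :: xs) = myK (acc ++ [x]) xs from by simp [myK]]
      exact ih acc x
    · rw [List.filter_cons_of_pos (by simp [hxa])]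
      by_cases hx : x ∈ acc
      · rw [show myK (acc ++ [a]) (x :: xs) = myK (acc ++ [a]) xs from by simp [myK, hx, hxa],
          show myK acc (x :: xs.filter (fun y => !(y == a))) = myK acc (xs.filter (fun y => !(y == a))) from by simp [myK, hx]]
        exact ih acc a
      · rw [show myK (acc ++ [a]) (x :: xs) = x :: myK ((acc ++ [a]) ++ [x]) xs from by simp [myK, hx, hxa],
          show myK acc (x :: xs.filter (fun y => !(y == a))) = x :: myK (acc ++ [x]) (xs.filter (fun y => !(y == a))) from by simp [myK, hx],
          myK_congr xs ((acc ++ [a]) ++ [x]) ((acc ++ [x]) ++ [a]) (by intro y; simp; tauto),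
          ih (acc ++ [x]) a]

-- A's names loop is myK.
theorem namesFold (rows : List (List String)) : ∀ (acc : List String),
    rows.foldl (fun ns r => if r.headD "" ∈ ns then ns else ns ++ [r.headD ""]) acc
      = acc ++ myK acc (rows.map (·.headD "")) := by
  induction rows with
  | nil => intro acc; simp [myK]
  | cons row rest ih =>
    intro acc
    simp only [List.foldl_cons, List.map_cons, myK]
    split_ifs with h
    · exact ih acc
    · rw [ih (acc ++ [row.headD ""]), List.append_assoc]; simp

-- A's dict loop: keys.
theorem keysFold (rows : List (List String)) : ∀ (d : PySem.Dict String (List (List String))),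
    (rows.foldl (fun d r => d.modify (r.headD "") [] (· ++ [r])) d).keys
      = d.keys ++ myK d.keys (rows.map (·.headD "")) := by
  induction rows with
  | nil => intro d; simp [myK]
  | cons row rest ih =>
    intro d
    simp only [List.foldl_cons, List.map_cons, myK]
    by_cases h : row.headD "" ∈ d.keys
    · rw [if_pos h, ih, PySem.Dict.keys_modify,
        PySem.Dict.keys_insert_of_contains _ _ ((PySem.Dict.contains_iff_mem_keys d _).mpr h)]
    · rw [if_neg h, ih, PySem.Dict.keys_modify,
        PySem.Dict.keys_insert_of_not_contains _ _
          (by simpa using (PySem.Dict.contains_iff_mem_keys d (row.headD "")).not.mpr h),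
        List.append_assoc]
      simp

-- A's dict loop: each entry collects the rows with that name, in order.
theorem getDFold (rows : List (List String)) :
    ∀ (d : PySem.Dict String (List (List String))) (k : String),
    (rows.foldl (fun d r => d.modify (r.headD "") [] (· ++ [r])) d).getD k []
      = d.getD k [] ++ rows.filter (fun r => r.headD "" == k) := by
  induction rows with
  | nil => intro d k; simp
  | cons row rest ih =>
    intro d k
    simp only [List.foldl_cons, List.filter_cons]
    rw [ih, PySem.Dict.getD_modify]
    split_ifs with h1 h2 h3
    · subst h1; simp [List.append_assoc]
    · exact absurd (by simp [h1]) h2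
    · exact absurd ((by simpa using h3 : row.headD "" = k)).symm h1
    · rfl

-- A computes the canonical form: first-seen names, each paired with its filtered group.
theorem A_char (rows : List (List String)) :
    groupNames rows =
      (myK [] (rows.map (·.headD "")),
       (myK [] (rows.map (·.headD ""))).map
         (fun k => (k, rows.filter (fun r => r.headD "" == k)))) := by
  unfold groupNames
  dsimp only
  rw [PySem.List.foldl_prod_mk
      (f := fun ns (r : List String) => if r.headD "" ∈ ns then ns else ns ++ [r.headD ""])
      (g := fun (d : PySem.Dict String (List (List String))) r =>
        d.modify (r.headD "") [] (· ++ [r]))]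
  dsimp only
  have hnd : (rows.foldl (fun d r => d.modify (r.headD "") [] (· ++ [r]))
      (PySem.Dict.empty : PySem.Dict String (List (List String)))).keys.Nodup :=
    PySem.Dict.nodup_keys_foldl_modify_key rows (fun r => r.headD "") []
      (fun _ r => (· ++ [r])) PySem.Dict.empty (by simp)
  rw [PySem.Dict.items_eq_map_keys _ hnd []]
  rw [keysFold, namesFold]
  simp only [PySem.Dict.keys_empty, List.nil_append]
  congr 1
  apply List.map_congr_left
  intro k _
  rw [getDFold]
  simp

-- B computes the same canonical form.
theorem B_char_aux : ∀ (n : Nat) (rows : List (List String)), rows.length ≤ n →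
    groupGo rows =
      (myK [] (rows.map (·.headD ""))).map
        (fun k => (k, rows.filter (fun r => r.headD "" == k))) := by
  intro n
  induction n with
  | zero =>
    intro rows h
    have : rows = [] := List.eq_nil_of_length_eq_zero (Nat.le_zero.mp h)
    subst this; rw [groupGo.eq_def]; simp [myK]
  | succ n ih =>
    intro rows h
    cases rows with
    | nil => rw [groupGo.eq_def]; simp [myK]
    | cons row rest =>
      rw [groupGo.eq_def]
      dsimp only
      rw [ih (rest.filter (fun r => !(r.headD "" == row.headD "")))
          (le_trans (List.length_filter_le _ _)
            (Nat.lt_succ_iff.mp (lt_of_lt_of_le (by simp) h)))]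
      have hmapfilter : (rest.map (·.headD "")).filter (fun y => !(y == row.headD ""))
          = (rest.filter (fun r => !(r.headD "" == row.headD ""))).map (·.headD "") := by
        rw [List.filter_map]; rfl
      simp only [List.map_cons, myK, List.not_mem_nil, if_false]
      rw [show myK ([] ++ [row.headD ""]) (rest.map (·.headD ""))
            = myK [] ((rest.map (·.headD "")).filter (fun y => !(y == row.headD ""))) from
          myK_filter _ [] _, hmapfilter]
      congr 1
      apply List.map_congr_left
      intro k hk
      have hkne : k ≠ row.headD "" := by
        have hmem := mem_myK hk
        rw [← hmapfilter] at hmem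
        rcases List.mem_filter.mp hmem with ⟨_, hne⟩
        simpa using hne
      congr 1
      rw [List.filter_cons, if_neg (by simpa using Ne.symm hkne), List.filter_filter]
      apply List.filter_congr
      intro r _
      simp only [Bool.and_eq_left_iff_imp, Bool.not_eq_true', beq_eq_false_iff_ne,
        ne_eq, beq_iff_eq]
      exact fun h1 h2 => hkne (h1 ▸ h2)

theorem B_char (rows : List (List String)) :
    groupGo rows =
      (myK [] (rows.map (·.headD ""))).map
        (fun k => (k, rows.filter (fun r => r.headD "" == k))) :=
  B_char_aux rows.length rows le_rfl

-- ===== VERDICT =====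
theorem groupNames_spec : Claim_equal_groupNames := by
  intro rows _ _
  show groupNames rows = groupNames_alt rows
  unfold groupNames_alt
  rw [A_char, B_char, List.map_map]
  congr 1
  simp [Function.comp_def]
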